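-- pv_equiv track=rewrite | github.com/cse-3-MAT/CC | CC3/cakewalk.py | marcsCakewalk
-- ===== SOURCE A (Python) =====
-- def marcsCakewalk(calorie):
--     # Write your code here
--     calorie = sorted(calorie,reverse=True)
--     s = 0
--     i = 0
--     for x in calorie:
--         s += (2**i)*x
--         i += 1
--     return s
-- ===== SOURCE B (Python) =====
-- def marcsCakewalk(calorie):
--     # Count each distinct calorie value, then walk the distinct values from the
--     # largest down, adding the whole block of c equal values at once with the
--     # geometric-series closed form: the c copies of value v occupy positions
--     # g .. g+c-1 in the optimal (descending) arrangement, where g is the number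
--     # of strictly greater elements, contributing v * 2**g * (2**c - 1).
--     cnt = {}
--     for x in calorie:
--         cnt[x] = cnt.get(x, 0) + 1
--     total = 0
--     g = 0
--     for v in sorted(cnt, reverse=True):
--         c = cnt[v]
--         total += v * 2 ** g * (2 ** c - 1)
--         g += c
--     return total
-- ===== Notes on version B (the rewrite author's own statement) =====
-- stated objective: alternative
-- what changed: Replaces the sort of the whole list with per-index powers 2**i by a frequency-counting algorithm: build a count dictionary, walk only the distinct values from largest to smallest, and add each block of c equal values at once with the geometric-series closed form v*2**g*(2**c-1), where g is the running count of strictly greater elements.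
import Mathlib
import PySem

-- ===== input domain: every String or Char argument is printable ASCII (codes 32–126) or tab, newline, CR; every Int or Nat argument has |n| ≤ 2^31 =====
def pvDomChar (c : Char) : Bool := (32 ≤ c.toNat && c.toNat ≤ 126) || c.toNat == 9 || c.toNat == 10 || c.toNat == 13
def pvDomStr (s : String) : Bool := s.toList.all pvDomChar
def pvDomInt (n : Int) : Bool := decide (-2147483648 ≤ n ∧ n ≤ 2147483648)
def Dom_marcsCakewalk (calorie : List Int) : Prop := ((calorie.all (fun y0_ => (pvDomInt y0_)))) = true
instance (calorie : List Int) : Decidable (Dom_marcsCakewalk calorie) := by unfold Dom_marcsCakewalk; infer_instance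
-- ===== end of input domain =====

-- B replaces A's full-list sort + per-index 2**i weights by a frequency counter over the
-- distinct values, adding each block of equal values at once with a geometric-series
-- closed form; same return value, different algorithm.


-- ===== PORT A =====
-- sorted(calorie, reverse=True); then s += (2**i)*x with i += 1 each step
def marcsCakewalk (calorie : List Int) : Int :=
  let c := PySem.List.sorted calorie (fun x => x) true
  (c.foldl (fun (si : Int × Nat) x => (si.1 + 2 ^ si.2 * x, si.2 + 1)) (0, 0)).1

-- ===== PORT B =====
-- cnt[x] = cnt.get(x, 0) + 1 over calorie; then total = g = 0 and, for v in
-- sorted(cnt, reverse=True): c = cnt[v]; total += v * 2**g * (2**c - 1); g += c.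
-- cnt[v] is ported as getD v 0 — exact, since v is drawn from cnt's keys;
-- 2**g / 2**c are ported as 2 ^ ·.toNat — exact, since counts and g are ≥ 0.
def marcsCakewalk_alt (calorie : List Int) : Int :=
  let cnt := calorie.foldl (fun d x => d.insert x (d.getD x 0 + 1)) PySem.Dict.empty
  let ks := PySem.List.sorted cnt.keys (fun x => x) true
  (ks.foldl (fun (tg : Int × Int) v =>
      let c := cnt.getD v 0
      (tg.1 + v * 2 ^ tg.2.toNat * (2 ^ c.toNat - 1), tg.2 + c)) (0, 0)).1

-- ===== PRECONDITION & SPEC =====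
def Spec_marcsCakewalk (calorie : List Int) (out : Int) : Prop := out = marcsCakewalk_alt calorie
instance (calorie : List Int) (out : Int) : Decidable (Spec_marcsCakewalk calorie out) := by unfold Spec_marcsCakewalk; infer_instance

-- ===== CLAIM (what is proved, stated in full; the proofs are below) =====
def Claim_equal_marcsCakewalk : Prop := ∀ (calorie : List Int), Dom_marcsCakewalk calorie → Spec_marcsCakewalk calorie (marcsCakewalk calorie)

-- ===== LEMMAS AND PROOFS =====

-- pvS l = l[0] + 2*l[1] + 4*l[2] + … : the weighted sum with weights doubling along l
def pvS : List Int → Int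
  | [] => 0
  | x :: t => x + 2 * pvS t

-- number of elements of l strictly greater than v
def pvG (l : List Int) (v : Int) : Nat := l.countP (fun w => decide (v < w))

-- the contribution of one distinct value v of l in the descending arrangement
def pvTerm (l : List Int) (v : Int) : Int := v * 2 ^ pvG l v * ((2 : Int) ^ l.count v - 1)

-- A's fold computes s + 2^i * pvS l
theorem pvAfold (l : List Int) (s : Int) (i : Nat) :
    (l.foldl (fun (si : Int × Nat) x => (si.1 + 2 ^ si.2 * x, si.2 + 1)) (s, i)).1
      = s + 2 ^ i * pvS l := by
  induction l generalizing s i with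
  | nil => simp [pvS]
  | cons x t ih =>
      simp only [List.foldl_cons, pvS, ih]
      ring

-- countP over a list as a sum over its distinct values
theorem pvCountP (l : List Int) (p : Int → Bool) :
    l.countP p = ∑ v ∈ l.toFinset, (if p v then l.count v else 0) := by
  induction l with
  | nil => simp
  | cons x t ih =>
      have hrest : ∀ v, v ≠ x →
          (if p v then (x :: t).count v else 0) = (if p v then t.count v else 0) := by
        intro v hne
        have hxv : x ≠ v := Ne.symm hne
        simp [List.count_cons, hxv]
      by_cases hx : x ∈ t.toFinset
      · have hins : (x :: t).toFinset = t.toFinset := by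
          simp [List.toFinset_cons, Finset.insert_eq_self.2 hx]
        rw [hins, ← Finset.add_sum_erase t.toFinset _ hx]
        have he : (∑ v ∈ t.toFinset.erase x, (if p v then (x :: t).count v else 0))
            = ∑ v ∈ t.toFinset.erase x, (if p v then t.count v else 0) :=
          Finset.sum_congr rfl (fun v hv => hrest v (Finset.mem_erase.1 hv).1)
        have ih' : t.countP p
            = (if p x then t.count x else 0) + ∑ v ∈ t.toFinset.erase x, (if p v then t.count v else 0) :=
          ih.trans (Finset.add_sum_erase t.toFinset _ hx).symm
        rw [he, List.countP_cons, ih']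
        have hcx : (x :: t).count x = t.count x + 1 := by simp [List.count_cons]
        by_cases hp : p x <;> simp [hp, hcx] <;> omega
      · have hnx : x ∉ t := fun h => hx (List.mem_toFinset.2 h)
        rw [List.toFinset_cons, Finset.sum_insert hx]
        have he : (∑ v ∈ t.toFinset, (if p v then (x :: t).count v else 0))
            = ∑ v ∈ t.toFinset, (if p v then t.count v else 0) :=
          Finset.sum_congr rfl (fun v hv => hrest v
            (fun h => hnx (h ▸ List.mem_toFinset.1 hv)))
        rw [he, List.countP_cons, ih]
        have hcx : (x :: t).count x = 1 := by
          simp [List.count_eq_zero_of_not_mem hnx]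
        by_cases hp : p x <;> simp [hp, hcx] <;> omega

-- the main characterisation: for a descending list, the doubling-weighted sum equals
-- the sum over distinct values of the geometric-series closed form
theorem pvMain : ∀ l : List Int, l.Pairwise (fun a b => b ≤ a) →
    pvS l = ∑ v ∈ l.toFinset, pvTerm l v := by
  intro l
  induction l with
  | nil => simp [pvS]
  | cons x t ih =>
      intro hp
      have hle : ∀ w ∈ t, w ≤ x := fun w hw => (List.pairwise_cons.1 hp).1 w hw
      have ht : t.Pairwise (fun a b => b ≤ a) := (List.pairwise_cons.1 hp).2
      have hgx : pvG (x :: t) x = 0 := by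
        unfold pvG
        rw [List.countP_eq_zero]
        intro w hw
        rcases List.mem_cons.1 hw with h | h
        · simp [h]
        · simp [not_lt.2 (hle w h)]
      have hgv : ∀ v ∈ t.toFinset, v ≠ x → pvG (x :: t) v = pvG t v + 1 := by
        intro v hv hne
        have hvt : v ∈ t := List.mem_toFinset.1 hv
        have hvx : v < x := lt_of_le_of_ne (hle v hvt) hne
        unfold pvG
        simp [List.countP_cons, hvx]
      have hcv : ∀ v : Int, v ≠ x → (x :: t).count v = t.count v := by
        intro v hne; simp [List.count_cons, Ne.symm hne]
      have htermv : ∀ v ∈ t.toFinset, v ≠ x → pvTerm (x :: t) v = 2 * pvTerm t v := by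
        intro v hv hne
        unfold pvTerm
        rw [hgv v hv hne, hcv v hne, pow_succ]
        ring
      by_cases hx : x ∈ t.toFinset
      · have hins : (x :: t).toFinset = t.toFinset := by
          simp [List.toFinset_cons, Finset.insert_eq_self.2 hx]
        rw [pvS, ih ht, hins]
        rw [← Finset.add_sum_erase t.toFinset (pvTerm (x :: t)) hx,
            ← Finset.add_sum_erase t.toFinset (pvTerm t) hx]
        have hrest : (∑ v ∈ t.toFinset.erase x, pvTerm (x :: t) v)
            = ∑ v ∈ t.toFinset.erase x, 2 * pvTerm t v := by
          refine Finset.sum_congr rfl ?_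
          intro v hv
          exact htermv v (Finset.mem_erase.1 hv).2 (Finset.mem_erase.1 hv).1
        rw [hrest, ← Finset.mul_sum]
        have hgtx : pvG t x = 0 := by
          unfold pvG
          rw [List.countP_eq_zero]
          intro w hw; simp [not_lt.2 (hle w hw)]
        have hcx : (x :: t).count x = t.count x + 1 := by simp [List.count_cons]
        unfold pvTerm
        rw [hgx, hgtx, hcx, pow_succ]
        ring
      · have hnx : x ∉ t := fun h => hx (List.mem_toFinset.2 h)
        rw [pvS, ih ht, List.toFinset_cons, Finset.sum_insert hx]
        have hrest : (∑ v ∈ t.toFinset, pvTerm (x :: t) v)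
            = ∑ v ∈ t.toFinset, 2 * pvTerm t v := by
          refine Finset.sum_congr rfl ?_
          intro v hv
          exact htermv v hv (fun h => hnx (h ▸ List.mem_toFinset.1 hv))
        rw [hrest, ← Finset.mul_sum]
        have hcx : (x :: t).count x = 1 := by
          simp [List.count_cons, List.count_eq_zero_of_not_mem hnx]
        unfold pvTerm
        rw [hgx, hcx]
        ring

-- the contribution of the blocks of a distinct-value list, descending order:
-- each value v of K contributes a block of (cal.count v) copies of v
def pvBlocks (cal : List Int) : List Int → Int
  | [] => 0
  | v :: t => v * ((2 : Int) ^ cal.count v - 1) + (2 : Int) ^ cal.count v * pvBlocks cal t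

-- B's fold computes T + 2^g * pvBlocks cal K
theorem pvBfold (cal : List Int) :
    ∀ (K : List Int) (T : Int) (g : Nat),
      (K.foldl (fun (tg : Int × Int) v =>
          (tg.1 + v * 2 ^ tg.2.toNat * ((2 : Int) ^ cal.count v - 1),
           tg.2 + (cal.count v : Int))) (T, (g : Int))).1
        = T + 2 ^ g * pvBlocks cal K := by
  intro K
  induction K with
  | nil => simp [pvBlocks]
  | cons v t ih =>
      intro T g
      have hg : ((g : Int) + (cal.count v : Int)) = ((g + cal.count v : Nat) : Int) := by
        push_cast; ring
      simp only [List.foldl_cons, Int.toNat_natCast, hg, ih, pvBlocks, pow_add]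
      ring

-- for a strictly descending distinct-value list K, pvBlocks is the sum over K of
-- the geometric-series terms, with exponents counted inside K
theorem pvBlocksSum (cal : List Int) :
    ∀ K : List Int, K.Pairwise (fun a b => b < a) →
      pvBlocks cal K = ∑ v ∈ K.toFinset,
        (v * 2 ^ (∑ u ∈ K.toFinset, if v < u then cal.count u else 0)
          * ((2 : Int) ^ cal.count v - 1)) := by
  intro K
  induction K with
  | nil => simp [pvBlocks]
  | cons v t ih =>
      intro hp
      have hlt : ∀ u ∈ t, u < v := fun u hu => (List.pairwise_cons.1 hp).1 u hu
      have ht := (List.pairwise_cons.1 hp).2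
      have hvt : v ∉ t := fun h => lt_irrefl v (hlt v h)
      have hvfin : v ∉ t.toFinset := fun h => hvt (List.mem_toFinset.1 h)
      have hins : (v :: t).toFinset = insert v t.toFinset := List.toFinset_cons
      have hgof : ∀ w, (∑ u ∈ insert v t.toFinset, if w < u then cal.count u else 0)
          = (if w < v then cal.count v else 0)
            + ∑ u ∈ t.toFinset, (if w < u then cal.count u else 0) := by
        intro w; rw [Finset.sum_insert hvfin]
      rw [pvBlocks, ih ht, hins, Finset.sum_insert hvfin]
      have hv0 : (∑ u ∈ insert v t.toFinset, if v < u then cal.count u else 0) = 0 := by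
        have hz : ∀ u ∈ t.toFinset, (if v < u then cal.count u else 0) = 0 := by
          intro u hu
          simp [not_lt.2 (le_of_lt (hlt u (List.mem_toFinset.1 hu)))]
        rw [hgof v, if_neg (lt_irrefl v), Finset.sum_eq_zero hz]
        simp
      rw [hv0]
      have hrest : (∑ w ∈ t.toFinset,
          (w * 2 ^ (∑ u ∈ insert v t.toFinset, if w < u then cal.count u else 0)
            * ((2 : Int) ^ cal.count w - 1)))
          = ∑ w ∈ t.toFinset, (2 : Int) ^ cal.count v *
              (w * 2 ^ (∑ u ∈ t.toFinset, if w < u then cal.count u else 0)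
                * ((2 : Int) ^ cal.count w - 1)) := by
        refine Finset.sum_congr rfl ?_
        intro w hw
        have hwv : w < v := hlt w (List.mem_toFinset.1 hw)
        rw [hgof w, if_pos hwv, pow_add]
        ring
      rw [hrest, ← Finset.mul_sum]
      ring

-- ===== VERDICT (by name: the statement is the Claim_ definition above) =====
theorem marcsCakewalk_spec : Claim_equal_marcsCakewalk := by
  intro calorie _
  unfold Spec_marcsCakewalk marcsCakewalk marcsCakewalk_alt
  -- A side
  have hperm := PySem.List.sorted_perm calorie (fun x => x) true
  have hA : (((PySem.List.sorted calorie (fun x => x) true).foldl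
      (fun (si : Int × Nat) x => (si.1 + 2 ^ si.2 * x, si.2 + 1)) (0, 0)).1)
      = ∑ v ∈ calorie.toFinset, pvTerm calorie v := by
    rw [pvAfold]
    have hmain := pvMain (PySem.List.sorted calorie (fun x => x) true)
      (PySem.List.sorted_pairwise_rev calorie (fun x => x))
    have hfin : (PySem.List.sorted calorie (fun x => x) true).toFinset = calorie.toFinset :=
      Finset.ext fun a => by simp [List.mem_toFinset, hperm.mem_iff]
    have hterm : ∀ v, pvTerm (PySem.List.sorted calorie (fun x => x) true) v
        = pvTerm calorie v := by
      intro v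
      unfold pvTerm pvG
      rw [hperm.count_eq, hperm.countP_eq]
    simp only [hmain, hfin]
    rw [Finset.sum_congr rfl (fun v _ => hterm v)]
    ring
  rw [hA]
  -- B side
  rw [PySem.Dict.foldl_insert_getD_add_one_eq_counter]
  dsimp only
  rw [PySem.Dict.keys_counter]
  -- the fold step, with the dict lookup evaluated to the count of v in calorie
  have hstep : (fun (tg : Int × Int) v =>
      (tg.1 + v * 2 ^ tg.2.toNat * (2 ^ ((PySem.Dict.counter calorie).getD v 0).toNat - 1),
       tg.2 + (PySem.Dict.counter calorie).getD v 0))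
      = fun (tg : Int × Int) v =>
      (tg.1 + v * 2 ^ tg.2.toNat * ((2 : Int) ^ calorie.count v - 1),
       tg.2 + (calorie.count v : Int)) := by
    funext tg v
    rw [PySem.Dict.getD_counter, Int.toNat_natCast]
  set K := PySem.List.sorted (PySem.Set.ofList calorie) (fun x => x) true with hK
  have hKperm : K.Perm (PySem.Set.ofList calorie) :=
    PySem.List.sorted_perm (PySem.Set.ofList calorie) (fun x => x) true
  have hKnd : K.Nodup := hKperm.nodup_iff.2 (PySem.Set.nodup_ofList calorie)
  have hKgt : K.Pairwise (fun a b => b < a) := by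
    have h1 : K.Pairwise (fun a b => b ≤ a) :=
      PySem.List.sorted_pairwise_rev (PySem.Set.ofList calorie) (fun x => x)
    have h2 : K.Pairwise (fun a b : Int => a ≠ b) := hKnd
    exact (h1.and h2).imp (fun h => lt_of_le_of_ne h.1 (Ne.symm h.2))
  have hKfin : K.toFinset = calorie.toFinset := by
    ext a
    simp [List.mem_toFinset, hKperm.mem_iff, PySem.Set.mem_ofList]
  have hB : (K.foldl (fun (tg : Int × Int) v =>
      (tg.1 + v * 2 ^ tg.2.toNat * ((2 : Int) ^ calorie.count v - 1),
       tg.2 + (calorie.count v : Int))) (0, 0)).1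
      = ∑ v ∈ calorie.toFinset, pvTerm calorie v := by
    have h0 : ((0 : Int), (0 : Int)) = ((0 : Int), ((0 : Nat) : Int)) := by norm_num
    rw [h0, pvBfold calorie K 0 0, pvBlocksSum calorie K hKgt, hKfin]
    have hterm : ∀ v ∈ calorie.toFinset,
        (v * 2 ^ (∑ u ∈ calorie.toFinset, if v < u then calorie.count u else 0)
          * ((2 : Int) ^ calorie.count v - 1)) = pvTerm calorie v := by
      intro v _
      unfold pvTerm pvG
      rw [pvCountP calorie (fun w => decide (v < w))]
      simp
    rw [Finset.sum_congr rfl hterm]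
    ring
  rw [hstep]
  exact hB.symm
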